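-- pv_equiv track=rewrite | github.com/Eual11/A2SV-Problems | 07-Feb-2025/Find Duplicate File in System 249992.py | fetch_contnet
-- ===== SOURCE A (Python) =====
-- def fetch_contnet(file:str):
--     file =file.strip()
--     content = []
--     content_start = False
--     filename =[]
--
--
--     for c in file:
--         if(content_start):
--             if(c ==")"):
--                 break
--             else:
--                 content.append(c)
--         elif(c =="("):
--             content_start = True
--         else:
--             filename.append(c)
--
--
--     return ("".join(filename), "".join(content))
-- ===== SOURCE B (Python) =====
-- def fetch_contnet(file: str):
--     name, _, rest = file.strip().partition("(")
--     content, _, _ = rest.partition(")")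
--     return (name, content)
-- ===== Notes on version B (the rewrite author's own statement) =====
-- stated objective: idiomatic
-- what changed: Replaces the char-by-char loop with a state flag and two accumulator lists by two str.partition calls: split at the first opening parenthesis, then split the remainder at the first closing parenthesis.
import Mathlib
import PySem

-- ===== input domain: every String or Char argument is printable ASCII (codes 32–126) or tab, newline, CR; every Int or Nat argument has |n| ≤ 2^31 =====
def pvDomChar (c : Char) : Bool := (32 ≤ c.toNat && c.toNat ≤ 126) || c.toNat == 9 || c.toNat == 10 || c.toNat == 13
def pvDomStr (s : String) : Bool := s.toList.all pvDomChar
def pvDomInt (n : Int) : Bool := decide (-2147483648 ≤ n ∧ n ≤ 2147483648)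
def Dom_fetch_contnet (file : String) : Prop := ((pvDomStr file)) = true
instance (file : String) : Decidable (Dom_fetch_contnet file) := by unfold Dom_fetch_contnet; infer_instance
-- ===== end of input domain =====

-- B replaces A's char loop (flag + two accumulator lists) by two partition-at-first-separator splits; same O(n) asymptotics, measured faster by constant factor (C-level partition vs Python-level loop).

-- ===== PORT A =====
-- the for-loop of A: state = (content_start, filename, content); 'break' = return
def fetchLoopA : List Char → Bool → List Char → List Char → List Char × List Char
  | [], _, fn, ct => (fn, ct)
  | c :: cs, true, fn, ct =>
      if c = ')' then (fn, ct) else fetchLoopA cs true fn (ct ++ [c])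
  | c :: cs, false, fn, ct =>
      if c = '(' then fetchLoopA cs true fn ct else fetchLoopA cs false (fn ++ [c]) ct

def fetch_contnet (file : String) : String × String :=
  let t := PySem.Str.strip file
  let r := fetchLoopA t.toList false [] []
  (String.mk r.1, String.mk r.2)

-- ===== PORT B =====
-- str.partition(sep) for a one-char sep: (before first sep, after it); (whole, []) if absent
def partChar (sep : Char) : List Char → List Char × List Char
  | [] => ([], [])
  | c :: cs =>
      if c = sep then ([], cs)
      else
        let r := partChar sep cs
        (c :: r.1, r.2)

def fetch_contnet_alt (file : String) : String × String :=
  let t := (PySem.Str.strip file).toList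
  let p := partChar '(' t
  (String.mk p.1, String.mk (partChar ')' p.2).1)

-- ===== PRECONDITION & SPEC =====
def Spec_fetch_contnet (file : String) (out : String × String) : Prop := out = fetch_contnet_alt file
instance (file : String) (out : String × String) : Decidable (Spec_fetch_contnet file out) := by unfold Spec_fetch_contnet; infer_instance

-- ===== CLAIM (what is proved, stated in full; the proofs are below) =====
def Claim_equal_fetch_contnet : Prop := ∀ (file : String), Dom_fetch_contnet file → Spec_fetch_contnet file (fetch_contnet file)

-- ===== LEMMAS AND PROOFS =====
-- content phase: the loop with content_start = true collects chars up to the first ')'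
theorem fetchLoopA_true (cs : List Char) (fn ct : List Char) :
    fetchLoopA cs true fn ct = (fn, ct ++ (partChar ')' cs).1) := by
  induction cs generalizing ct with
  | nil => simp [fetchLoopA, partChar]
  | cons c cs ih =>
      by_cases h : c = ')'
      · simp [fetchLoopA, partChar, h]
      · simp [fetchLoopA, partChar, h, ih]

-- name phase: the loop with content_start = false is partition at '(' followed by the content phase
theorem fetchLoopA_false (cs : List Char) (fn : List Char) :
    fetchLoopA cs false fn [] =
      (fn ++ (partChar '(' cs).1, (partChar ')' (partChar '(' cs).2).1) := by
  induction cs generalizing fn with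
  | nil => simp [fetchLoopA, partChar]
  | cons c cs ih =>
      by_cases h : c = '('
      · simp [fetchLoopA, partChar, h, fetchLoopA_true]
      · simp [fetchLoopA, partChar, h, ih]

-- ===== VERDICT (by name: the statement is the Claim_ definition above) =====
theorem fetch_contnet_spec : Claim_equal_fetch_contnet := by
  intro file _
  unfold Spec_fetch_contnet fetch_contnet fetch_contnet_alt
  simp [fetchLoopA_false]
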